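-- pv_equiv track=rewrite | github.com/htem/cb2_project_analysis | analysis/tools2.py | compute_mf_share
-- ===== SOURCE A (Python) =====
-- from collections import defaultdict
--
-- def compute_mf_share(nids, mf_grc_db):
--     count = defaultdict(lambda: defaultdict(list))
--     grcs = nids
--     for i in range(len(grcs)):
--         grc_i = grcs[i]
--         if grc_i in mf_grc_db:
--             i_set = set(mf_grc_db[grc_i].keys())
--             for j in range(len(grcs)):
--                 if i == j:
--                     continue
--                 grc_j = grcs[j]
--                 if grc_j in mf_grc_db:
--                     j_set = set(mf_grc_db[grcs[j]].keys())
--                     common_mfs = i_set & j_set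
--                     if len(common_mfs):
--                         count[grcs[i]][len(common_mfs)].append(grcs[j])
--     return count
-- ===== SOURCE B (Python) =====
-- def compute_mf_share(nids, mf_grc_db):
--     # Inverted index mf -> grc indices: count shared mossy fibers per pair once,
--     # instead of re-building and intersecting key sets for every ordered pair.
--     n = len(nids)
--     keysets = {}
--     for g in nids:
--         if g not in keysets:
--             m = mf_grc_db.get(g)
--             if m is not None:
--                 keysets[g] = list(m.keys())
--     inv = {}
--     for i in range(n):
--         g = nids[i]
--         if g in keysets:
--             for mf in keysets[g]:
--                 inv.setdefault(mf, []).append(i)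
--     result = {}
--     for i in range(n):
--         g = nids[i]
--         if g not in keysets:
--             continue
--         cnt = {}
--         for mf in keysets[g]:
--             for j in inv.get(mf, []):
--                 cnt[j] = cnt.get(j, 0) + 1
--         for j in sorted(cnt):
--             if j == i:
--                 continue
--             inner = result.setdefault(g, {})
--             inner.setdefault(cnt[j], []).append(nids[j])
--     return result
-- ===== Notes on version B (the rewrite author's own statement) =====
-- stated objective: faster
-- what changed: Replaces A's O(n^2) pairwise key-set intersections with an inverted index mossy-fiber->grc-indices built in one pass, accumulating shared counts per pair once and emitting buckets in ascending index order (which reproduces A's j-scan order).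
import Mathlib
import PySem

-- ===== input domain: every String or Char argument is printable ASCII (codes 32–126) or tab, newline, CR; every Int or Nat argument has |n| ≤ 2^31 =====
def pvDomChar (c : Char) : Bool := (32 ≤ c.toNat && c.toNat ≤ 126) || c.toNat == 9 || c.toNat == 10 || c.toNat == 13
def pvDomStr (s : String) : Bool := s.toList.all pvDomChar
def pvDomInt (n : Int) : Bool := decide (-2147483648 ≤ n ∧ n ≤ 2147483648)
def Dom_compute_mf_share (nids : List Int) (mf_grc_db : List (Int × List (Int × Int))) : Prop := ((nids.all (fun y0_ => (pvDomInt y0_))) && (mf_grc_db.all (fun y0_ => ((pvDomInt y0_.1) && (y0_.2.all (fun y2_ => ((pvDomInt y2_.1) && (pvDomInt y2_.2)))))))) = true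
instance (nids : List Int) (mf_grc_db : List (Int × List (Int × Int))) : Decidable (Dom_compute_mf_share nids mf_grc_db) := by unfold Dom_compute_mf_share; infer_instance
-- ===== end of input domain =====

-- B replaces the quadratic pairwise set-intersection of A by an inverted index
-- mossy-fiber -> grc indices with per-pair shared counts accumulated once (objective: faster).
-- Pre_ restricts the association lists to ones whose inner key lists are duplicate-free,
-- i.e. to lists that actually represent Python dicts (a Python dict cannot have duplicate keys).


-- ===== PORT A =====
def compute_mf_share (nids : List Int) (mf_grc_db : List (Int × List (Int × Int))) : List (Int × List (Int × List Int)) :=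
  let grcs := nids
  let count : PySem.Dict Int (PySem.Dict Int (List Int)) :=
    (PySem.List.pyRange 0 (grcs.length : Int) 1).foldl (fun count i =>
      let grc_i := PySem.List.pyGetD grcs i 0
      match (PySem.Dict.mk mf_grc_db).get? grc_i with
      | none => count
      | some mi =>
        let i_set : PySem.Set Int := PySem.Set.ofList (PySem.Dict.mk mi).keys
        (PySem.List.pyRange 0 (grcs.length : Int) 1).foldl (fun count j =>
          if i = j then count
          else
            let grc_j := PySem.List.pyGetD grcs j 0
            match (PySem.Dict.mk mf_grc_db).get? grc_j with
            | none => count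
            | some mj =>
              let j_set : PySem.Set Int := PySem.Set.ofList (PySem.Dict.mk mj).keys
              let common_mfs := PySem.Set.inter i_set j_set
              if common_mfs.length ≠ 0 then
                -- count[grcs[i]][len(common_mfs)].append(grcs[j]) on the defaultdicts
                count.modify grc_i PySem.Dict.empty
                  (fun inner => inner.modify (common_mfs.length : Int) [] (fun b => b ++ [grc_j]))
              else count) count) PySem.Dict.empty
  count.items.map (fun p => (p.1, p.2.items))

-- ===== PORT B =====
def compute_mf_share_alt (nids : List Int) (mf_grc_db : List (Int × List (Int × Int))) : List (Int × List (Int × List Int)) :=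
  let n : Int := (nids.length : Int)
  let keysets : PySem.Dict Int (List Int) :=
    nids.foldl (fun ks g =>
      if ks.contains g then ks
      else
        match (PySem.Dict.mk mf_grc_db).get? g with
        | none => ks
        | some m => ks.insert g (PySem.Dict.mk m).keys) PySem.Dict.empty
  let inv : PySem.Dict Int (List Int) :=
    (PySem.List.pyRange 0 n 1).foldl (fun inv i =>
      let g := PySem.List.pyGetD nids i 0
      match keysets.get? g with
      | none => inv
      | some ks =>
        -- inv.setdefault(mf, []).append(i)
        ks.foldl (fun inv mf => inv.modify mf [] (fun l => l ++ [i])) inv) PySem.Dict.empty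
  let result : PySem.Dict Int (PySem.Dict Int (List Int)) :=
    (PySem.List.pyRange 0 n 1).foldl (fun result i =>
      let g := PySem.List.pyGetD nids i 0
      match keysets.get? g with
      | none => result
      | some ks =>
        let cnt : PySem.Dict Int Int :=
          ks.foldl (fun cnt mf =>
            (inv.getD mf []).foldl (fun cnt j => cnt.insert j (cnt.getD j 0 + 1)) cnt)
            PySem.Dict.empty
        (PySem.List.sorted cnt.keys (fun x => x)).foldl (fun result j =>
          if j = i then result
          else
            -- result.setdefault(g, {}).setdefault(cnt[j], []).append(nids[j])
            result.modify g PySem.Dict.empty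
              (fun inner => inner.modify (cnt.getD j 0) [] (fun b => b ++ [PySem.List.pyGetD nids j 0])))
          result) PySem.Dict.empty
  result.items.map (fun p => (p.1, p.2.items))

-- ===== PRECONDITION & SPEC =====
-- Pre_ excludes no input the Python A can be called on: it only requires every inner
-- association list to have duplicate-free keys, which is automatic for a real Python dict.
def Pre_compute_mf_share (nids : List Int) (mf_grc_db : List (Int × List (Int × Int))) : Prop :=
  ∀ p ∈ mf_grc_db, (p.2.map Prod.fst).Nodup
instance (nids : List Int) (mf_grc_db : List (Int × List (Int × Int))) : Decidable (Pre_compute_mf_share nids mf_grc_db) := by unfold Pre_compute_mf_share; infer_instance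

def pvWitness_compute_mf_share : List Int × (List (Int × List (Int × Int))) :=
  ([1, 2, 3], [(1, [(5, 0), (6, 0)]), (2, [(5, 0)]), (3, [(6, 0), (7, 1)])])

def Spec_compute_mf_share (nids : List Int) (mf_grc_db : List (Int × List (Int × Int))) (out : List (Int × List (Int × List Int))) : Prop := out = compute_mf_share_alt nids mf_grc_db
instance (nids : List Int) (mf_grc_db : List (Int × List (Int × Int))) (out : List (Int × List (Int × List Int))) : Decidable (Spec_compute_mf_share nids mf_grc_db out) := by unfold Spec_compute_mf_share; infer_instance

-- ===== CLAIM (what is proved, stated in full; the proofs are below) =====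
def Claim_equal_compute_mf_share : Prop := ∀ (nids : List Int) (mf_grc_db : List (Int × List (Int × Int))), Dom_compute_mf_share nids mf_grc_db → Pre_compute_mf_share nids mf_grc_db → Spec_compute_mf_share nids mf_grc_db (compute_mf_share nids mf_grc_db)

-- ===== LEMMAS AND PROOFS =====

def mfpStep (db : List (Int × List (Int × Int))) :
    PySem.Dict Int (List Int) → Int → PySem.Dict Int (List Int) :=
  fun ks g =>
    if ks.contains g then ks
    else
      match (PySem.Dict.mk db).get? g with
      | none => ks
      | some m => ks.insert g (PySem.Dict.mk m).keys

def mfpKeyList (db : List (Int × List (Int × Int))) (g : Int) : Option (List Int) :=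
  ((PySem.Dict.mk db).get? g).map fun m => (PySem.Dict.mk m).keys

def mfpKeys (db : List (Int × List (Int × Int))) (g : Int) : List Int :=
  (mfpKeyList db g).getD []

theorem mfp_get?_mk_mem {κ ν : Type} [BEq κ] [LawfulBEq κ] (l : List (κ × ν)) (k : κ) (v : ν)
    (h : (PySem.Dict.mk l).get? k = some v) : (k, v) ∈ l := by
  induction l with
  | nil => simp [PySem.Dict.get?] at h
  | cons p t ih =>
    obtain ⟨a, b⟩ := p
    rw [PySem.Dict.get?_mk_cons] at h
    by_cases hak : a == k
    · simp [hak] at h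
      exact List.mem_cons.mpr (Or.inl (by simp [(beq_iff_eq).mp hak, h]))
    · simp [hak] at h
      exact List.mem_cons.mpr (Or.inr (ih h))

theorem mfpKeys_nodup (db : List (Int × List (Int × Int)))
    (pre : ∀ p ∈ db, (p.2.map Prod.fst).Nodup) (g : Int) : (mfpKeys db g).Nodup := by
  unfold mfpKeys mfpKeyList
  cases hdb : (PySem.Dict.mk db).get? g with
  | none => simp
  | some m =>
    simp only [Option.map_some, Option.getD_some]
    have hm := mfp_get?_mk_mem db g m hdb
    have := pre (g, m) hm
    simpa [PySem.Dict.keys] using this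

theorem mfpKs_isSome_foldl (db : List (Int × List (Int × Int))) (l : List Int) :
    ∀ (ks : PySem.Dict Int (List Int)) (g : Int), (ks.get? g).isSome →
      ((l.foldl (mfpStep db) ks).get? g).isSome := by
  induction l with
  | nil => intro ks g h; simpa using h
  | cons a t ih =>
    intro ks g h
    simp only [List.foldl_cons]
    apply ih
    unfold mfpStep
    split
    · exact h
    · split
      · exact h
      · rw [PySem.Dict.get?_insert]
        split
        · simp
        · exact h

theorem mfpKs_sound (db : List (Int × List (Int × Int))) (l : List Int) :
    ∀ (ks : PySem.Dict Int (List Int)),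
      (∀ g, ks.get? g = none ∨ ks.get? g = mfpKeyList db g) →
      ∀ g, (l.foldl (mfpStep db) ks).get? g = none ∨
           (l.foldl (mfpStep db) ks).get? g = mfpKeyList db g := by
  induction l with
  | nil => intro ks h g; simpa using h g
  | cons a t ih =>
    intro ks h g
    simp only [List.foldl_cons]
    apply ih
    intro g'
    unfold mfpStep
    split
    · exact h g'
    · cases hdb : (PySem.Dict.mk db).get? a with
      | none => exact h g'
      | some m =>
        simp only
        rw [PySem.Dict.get?_insert]
        split
        · rename_i heq
          right
          subst heq
          simp [mfpKeyList, hdb]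
        · exact h g'

theorem mfpKs_some (db : List (Int × List (Int × Int))) (l : List Int) :
    ∀ (ks : PySem.Dict Int (List Int)) (g : Int), g ∈ l → (mfpKeyList db g).isSome →
      ((l.foldl (mfpStep db) ks).get? g).isSome := by
  induction l with
  | nil => intro ks g h; simp at h
  | cons a t ih =>
    intro ks g hg hsome
    simp only [List.foldl_cons]
    rcases List.mem_cons.mp hg with heq | hmem
    · subst heq
      apply mfpKs_isSome_foldl
      unfold mfpStep
      split
      · rename_i hc
        rwa [PySem.Dict.contains_eq_isSome_get?] at hc
      · cases hdb : (PySem.Dict.mk db).get? g with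
        | none => simp [mfpKeyList, hdb] at hsome
        | some m => simp
    · exact ih _ g hmem hsome

theorem mfpKsets_get (nids : List Int) (db : List (Int × List (Int × Int))) (g : Int)
    (hg : g ∈ nids) :
    (nids.foldl (mfpStep db) PySem.Dict.empty).get? g = mfpKeyList db g := by
  have hsound := mfpKs_sound db nids PySem.Dict.empty (fun g' => Or.inl (PySem.Dict.get?_empty g')) g
  cases hkl : mfpKeyList db g with
  | none =>
    rcases hsound with h | h
    · simp [h]
    · simp [h, hkl]
  | some ks =>
    have hiso := mfpKs_some db nids PySem.Dict.empty g hg (by simp [hkl])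
    rcases hsound with h | h
    · rw [h] at hiso; simp at hiso
    · rw [h, hkl]

def mfpShares (nids : List Int) (db : List (Int × List (Int × Int))) (i mf : Int) : Bool :=
  ((((PySem.Dict.mk db).get? (PySem.List.pyGetD nids i 0)).map
      fun m => (PySem.Dict.mk m).keys).getD []).contains mf

-- (7) inner append loop of the inverted index
theorem mfpInv_inner (ks : List Int) (d : PySem.Dict Int (List Int)) (i mf : Int) :
    (ks.foldl (fun d mf' => d.modify mf' [] (fun l => l ++ [i])) d).getD mf []
      = d.getD mf [] ++ List.replicate (ks.count mf) i := by
  induction ks generalizing d with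
  | nil => simp
  | cons m t ih =>
    simp only [List.foldl_cons]
    rw [ih, PySem.Dict.getD_modify]
    by_cases hmf : mf = m
    · subst hmf
      simp [List.count_cons_self, List.replicate_succ, List.append_assoc]
    · simp only [if_neg hmf]
      rw [List.count_cons_of_ne (Ne.symm hmf)]

-- ofList of a nodup list is itself
theorem mfp_ofList_aux {α : Type} [BEq α] [LawfulBEq α] (l : List α) :
    ∀ (s : List α), s.Nodup → (∀ x ∈ l, x ∉ s) → l.Nodup →
      List.foldl PySem.Set.add s l = s ++ l := by
  induction l with
  | nil => intro s _ _ _; simp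
  | cons a t ih =>
    intro s hs hd hn
    simp only [List.foldl_cons]
    have ha : a ∉ s := hd a (by simp)
    have hadd : PySem.Set.add s a = s ++ [a] := by
      unfold PySem.Set.add PySem.Set.contains
      rw [if_neg (fun h => ha (List.contains_iff_mem.mp h))]
    rw [hadd, ih (s ++ [a])]
    · simp
    · rw [List.nodup_append]
      refine ⟨hs, List.nodup_singleton a, ?_⟩
      intro x hx y hy
      have hy' : y = a := by simpa using hy
      subst hy'
      intro h
      exact ha (h ▸ hx)
    · intro x hx
      simp only [List.mem_append, List.mem_singleton]
      rintro (h | h)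
      · exact hd x (by simp [hx]) h
      · subst h; exact (List.nodup_cons.mp hn).1 hx
    · exact (List.nodup_cons.mp hn).2

theorem mfp_ofList_eq_self {α : Type} [BEq α] [LawfulBEq α] (l : List α) (h : l.Nodup) :
    PySem.Set.ofList l = l := by
  rw [PySem.Set.ofList_eq_foldl]
  simpa using mfp_ofList_aux l [] (by simp) (by simp) h

def mfpInvStep (nids : List Int) (db : List (Int × List (Int × Int))) :
    PySem.Dict Int (List Int) → Int → PySem.Dict Int (List Int) :=
  fun inv i =>
    match (nids.foldl (mfpStep db) PySem.Dict.empty).get? (PySem.List.pyGetD nids i 0) with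
    | none => inv
    | some ks => ks.foldl (fun inv mf => inv.modify mf [] (fun l => l ++ [i])) inv

theorem mfp_mem_of_idx (nids : List Int) {i : Int} (h0 : 0 ≤ i) (h1 : i < (nids.length : Int)) :
    PySem.List.pyGetD nids i 0 ∈ nids := by
  rw [PySem.List.pyGetD_eq_getElem nids 0 h0 h1]
  exact List.getElem_mem _

theorem mfpInv_getD_gen (nids : List Int) (db : List (Int × List (Int × Int)))
    (pre : ∀ p ∈ db, (p.2.map Prod.fst).Nodup) (l : List Int)
    (hl : ∀ i ∈ l, 0 ≤ i ∧ i < (nids.length : Int)) :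
    ∀ (d : PySem.Dict Int (List Int)) (mf : Int),
      (l.foldl (mfpInvStep nids db) d).getD mf []
        = d.getD mf [] ++ l.filter (fun i => mfpShares nids db i mf) := by
  induction l with
  | nil => intro d mf; simp
  | cons i t ih =>
    intro d mf
    have hi := hl i (by simp)
    have hmem := mfp_mem_of_idx nids hi.1 hi.2
    have hks := mfpKsets_get nids db _ hmem
    simp only [List.foldl_cons]
    have ht : ∀ i ∈ t, 0 ≤ i ∧ i < (nids.length : Int) := fun j hj => hl j (by simp [hj])
    cases hkl : mfpKeyList db (PySem.List.pyGetD nids i 0) with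
    | none =>
      have hstep : mfpInvStep nids db d i = d := by
        unfold mfpInvStep
        rw [hks, hkl]
      have hsh : mfpShares nids db i mf = false := by
        unfold mfpShares
        unfold mfpKeyList at hkl
        rw [hkl]
        simp
      rw [hstep, ih ht d mf, List.filter_cons, hsh]
      simp
    | some ks =>
      have hstep : mfpInvStep nids db d i
          = ks.foldl (fun inv mf => inv.modify mf [] (fun l => l ++ [i])) d := by
        unfold mfpInvStep
        rw [hks, hkl]
      have hnd : ks.Nodup := by
        have := mfpKeys_nodup db pre (PySem.List.pyGetD nids i 0)
        unfold mfpKeys at this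
        rw [hkl] at this
        simpa using this
      have hsh : mfpShares nids db i mf = ks.contains mf := by
        unfold mfpShares
        unfold mfpKeyList at hkl
        rw [hkl]
        rfl
      rw [hstep, ih ht _ mf, mfpInv_inner, List.filter_cons, hsh]
      by_cases hc : mf ∈ ks
      · have : ks.count mf = 1 := List.count_eq_one_of_mem hnd hc
        simp [this, hc, List.append_assoc]
      · have : ks.count mf = 0 := List.count_eq_zero.mpr hc
        simp [this, hc]

theorem mfpInv_getD (nids : List Int) (db : List (Int × List (Int × Int)))
    (pre : ∀ p ∈ db, (p.2.map Prod.fst).Nodup) (mf : Int) :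
    ((PySem.List.pyRange 0 (nids.length : Int) 1).foldl (mfpInvStep nids db) PySem.Dict.empty).getD mf []
      = (PySem.List.pyRange 0 (nids.length : Int) 1).filter (fun i => mfpShares nids db i mf) := by
  rw [mfpInv_getD_gen nids db pre _ (fun i hi => by
    have := PySem.List.mem_pyRange_one.mp hi; exact this)]
  simp

def mfpInv (nids : List Int) (db : List (Int × List (Int × Int))) : PySem.Dict Int (List Int) :=
  (PySem.List.pyRange 0 (nids.length : Int) 1).foldl (mfpInvStep nids db) PySem.Dict.empty

def mfpCnt (nids : List Int) (db : List (Int × List (Int × Int))) (ks : List Int) :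
    PySem.Dict Int Int :=
  ks.foldl (fun c mf =>
    ((mfpInv nids db).getD mf []).foldl (fun c j => c.insert j (c.getD j 0 + 1)) c)
    PySem.Dict.empty

-- (10) value of the per-pair counter
theorem mfpCnt_getD_gen (inv : PySem.Dict Int (List Int)) (ks : List Int) :
    ∀ (d : PySem.Dict Int Int) (j : Int),
      (ks.foldl (fun c mf =>
          (inv.getD mf []).foldl (fun c j' => c.insert j' (c.getD j' 0 + 1)) c) d).getD j 0
        = d.getD j 0 + ((ks.map (fun mf => ((inv.getD mf []).count j : Int))).sum) := by
  induction ks with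
  | nil => intro d j; simp
  | cons m t ih =>
    intro d j
    simp only [List.foldl_cons, List.map_cons, List.sum_cons]
    rw [ih, PySem.Dict.getD_foldl_insert_add_one]
    ring

-- (11) keys of the per-pair counter
theorem mfpCnt_keys_gen (inv : PySem.Dict Int (List Int)) (ks : List Int) :
    ∀ (d : PySem.Dict Int Int),
      (ks.foldl (fun c mf =>
          (inv.getD mf []).foldl (fun c j' => c.insert j' (c.getD j' 0 + 1)) c) d).keys
        = PySem.Set.update d.keys (ks.flatMap (fun mf => inv.getD mf [])) := by
  induction ks with
  | nil => intro d; simp [PySem.Set.update]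
  | cons m t ih =>
    intro d
    simp only [List.foldl_cons, List.flatMap_cons]
    rw [ih, PySem.Dict.keys_foldl_insert]
    unfold PySem.Set.update
    rw [List.foldl_append]

theorem mfpCnt_keys (nids : List Int) (db : List (Int × List (Int × Int))) (ks : List Int) :
    (mfpCnt nids db ks).keys
      = PySem.Set.ofList (ks.flatMap (fun mf => (mfpInv nids db).getD mf [])) := by
  unfold mfpCnt
  rw [mfpCnt_keys_gen]
  rw [PySem.Set.ofList_eq_foldl]
  simp [PySem.Set.update, PySem.Dict.keys_empty]

theorem mfp_range_nodup (n : Nat) : (PySem.List.pyRange 0 (n : Int) 1).Nodup := by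
  rw [PySem.List.pyRange_zero_natCast]
  refine List.Nodup.map ?_ List.nodup_range
  intro a b h
  simp only at h
  exact_mod_cast h

theorem mfp_range_pairwise (n : Nat) :
    List.Pairwise (fun a b => a < b) (PySem.List.pyRange 0 (n : Int) 1) := by
  rw [PySem.List.pyRange_zero_natCast]
  refine List.Pairwise.map _ ?_ List.pairwise_lt_range
  intro a b h
  exact_mod_cast h

-- (13/14) the sorted key list of the counter is the ascending list of sharing indices
theorem mfpSorted (nids : List Int) (db : List (Int × List (Int × Int)))
    (pre : ∀ p ∈ db, (p.2.map Prod.fst).Nodup) (ks : List Int) :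
    PySem.List.sorted (mfpCnt nids db ks).keys (fun x => x)
      = (PySem.List.pyRange 0 (nids.length : Int) 1).filter
          (fun j => ks.any (fun mf => mfpShares nids db j mf)) := by
  apply PySem.List.sorted_eq_of_perm_of_pairwise_lt
  · rw [List.perm_ext_iff_of_nodup]
    · intro j
      rw [List.mem_filter, mfpCnt_keys, PySem.Set.mem_ofList, List.mem_flatMap]
      constructor
      · rintro ⟨hjr, hany⟩
        rcases List.any_eq_true.mp hany with ⟨mf, hmf, hsh⟩
        refine ⟨mf, hmf, ?_⟩
        simp only [mfpInv]
        rw [mfpInv_getD nids db pre mf, List.mem_filter]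
        exact ⟨hjr, hsh⟩
      · rintro ⟨mf, hmf, hj⟩
        simp only [mfpInv] at hj
        rw [mfpInv_getD nids db pre mf, List.mem_filter] at hj
        exact ⟨hj.1, List.any_eq_true.mpr ⟨mf, hmf, hj.2⟩⟩
    · exact (mfp_range_nodup nids.length).filter _
    · rw [mfpCnt_keys]
      exact PySem.Set.nodup_ofList _
  · exact (mfp_range_pairwise nids.length).filter _

theorem mfpShares_eq (nids : List Int) (db : List (Int × List (Int × Int))) (j mf : Int) :
    mfpShares nids db j mf = (mfpKeys db (PySem.List.pyGetD nids j 0)).contains mf := rfl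

theorem mfp_contains_ofList {α : Type} [BEq α] [LawfulBEq α] (l : List α) (x : α) :
    (PySem.Set.ofList l : List α).contains x = l.contains x := by
  by_cases h : x ∈ l
  · rw [List.contains_iff_mem.mpr h]
    exact List.contains_iff_mem.mpr ((PySem.Set.mem_ofList l x).mpr h)
  · have h1 : l.contains x = false := by
      rw [Bool.eq_false_iff]; exact fun hc => h (List.contains_iff_mem.mp hc)
    have h2 : (PySem.Set.ofList l : List α).contains x = false := by
      rw [Bool.eq_false_iff]; exact fun hc => h ((PySem.Set.mem_ofList l x).mp (List.contains_iff_mem.mp hc))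
    rw [h1, h2]

-- the A-side intersection length, as a function of the j-side grc id
theorem mfp_inter_eq (ks ksj : List Int)
    (hnd : ks.Nodup) :
    PySem.Set.inter (PySem.Set.ofList ks) (PySem.Set.ofList ksj)
      = ks.filter (fun mf => ksj.contains mf) := by
  unfold PySem.Set.inter
  rw [mfp_ofList_eq_self ks hnd]
  apply List.filter_congr
  intro mf _
  exact mfp_contains_ofList ksj mf

-- (F2) counter value = intersection length, for j a valid index
theorem mfpCnt_getD_eq (nids : List Int) (db : List (Int × List (Int × Int)))
    (pre : ∀ p ∈ db, (p.2.map Prod.fst).Nodup) (ks : List Int) (j : Int)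
    (hjr : j ∈ PySem.List.pyRange 0 (nids.length : Int) 1) :
    (mfpCnt nids db ks).getD j 0
      = ((ks.filter (fun mf => mfpShares nids db j mf)).length : Int) := by
  unfold mfpCnt
  rw [mfpCnt_getD_gen]
  rw [PySem.Dict.getD_empty]
  have hmapeq : ks.map (fun mf => (((mfpInv nids db).getD mf []).count j : Int))
      = ks.map (fun mf => if mfpShares nids db j mf then (1 : Int) else 0) := by
    apply List.map_congr_left
    intro mf _
    simp only [mfpInv]
    rw [mfpInv_getD nids db pre mf]
    by_cases hsh : mfpShares nids db j mf
    · rw [List.count_filter (by simpa using hsh)]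
      rw [List.count_eq_one_of_mem (mfp_range_nodup nids.length) hjr]
      simp [hsh]
    · have : j ∉ (PySem.List.pyRange 0 (nids.length : Int) 1).filter
          (fun i => mfpShares nids db i mf) := by
        intro hmem
        exact hsh (by simpa using (List.mem_filter.mp hmem).2)
      rw [List.count_eq_zero.mpr this]
      simp [hsh]
  rw [hmapeq, PySem.List.sum_map_ite_one_zero]
  rw [List.countP_eq_length_filter]
  simp

theorem mfp_per_i (nids : List Int) (db : List (Int × List (Int × Int)))
    (pre : ∀ p ∈ db, (p.2.map Prod.fst).Nodup) (i : Int) (mi : List (Int × Int))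
    (hdb : (PySem.Dict.mk db).get? (PySem.List.pyGetD nids i 0) = some mi)
    (count : PySem.Dict Int (PySem.Dict Int (List Int))) :
    (PySem.List.pyRange 0 (nids.length : Int) 1).foldl (fun count j =>
        if i = j then count
        else
          match (PySem.Dict.mk db).get? (PySem.List.pyGetD nids j 0) with
          | none => count
          | some mj =>
            if ((PySem.Set.ofList (PySem.Dict.mk mi).keys).inter
                  (PySem.Set.ofList (PySem.Dict.mk mj).keys)).length ≠ 0 then
              count.modify (PySem.List.pyGetD nids i 0) PySem.Dict.empty fun inner =>
                inner.modify ((((PySem.Set.ofList (PySem.Dict.mk mi).keys).inter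
                    (PySem.Set.ofList (PySem.Dict.mk mj).keys)).length : Int)) []
                  fun b => b ++ [PySem.List.pyGetD nids j 0]
            else count) count
      = (PySem.List.sorted (mfpCnt nids db (PySem.Dict.mk mi).keys).keys (fun x => x)).foldl
          (fun count j =>
            if j = i then count
            else
              count.modify (PySem.List.pyGetD nids i 0) PySem.Dict.empty fun inner =>
                inner.modify ((mfpCnt nids db (PySem.Dict.mk mi).keys).getD j 0) []
                  fun b => b ++ [PySem.List.pyGetD nids j 0]) count := by
  have hkseq : mfpKeys db (PySem.List.pyGetD nids i 0) = (PySem.Dict.mk mi).keys := by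
    simp [mfpKeys, mfpKeyList, hdb]
  have hnd : (PySem.Dict.mk mi).keys.Nodup := hkseq ▸ mfpKeys_nodup db pre _
  have hA1 : (PySem.List.pyRange 0 (nids.length : Int) 1).foldl (fun count j =>
        if i = j then count
        else
          match (PySem.Dict.mk db).get? (PySem.List.pyGetD nids j 0) with
          | none => count
          | some mj =>
            if ((PySem.Set.ofList (PySem.Dict.mk mi).keys).inter
                  (PySem.Set.ofList (PySem.Dict.mk mj).keys)).length ≠ 0 then
              count.modify (PySem.List.pyGetD nids i 0) PySem.Dict.empty fun inner =>
                inner.modify ((((PySem.Set.ofList (PySem.Dict.mk mi).keys).inter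
                    (PySem.Set.ofList (PySem.Dict.mk mj).keys)).length : Int)) []
                  fun b => b ++ [PySem.List.pyGetD nids j 0]
            else count) count
      = (PySem.List.pyRange 0 (nids.length : Int) 1).foldl (fun count j =>
        if (¬ i = j) ∧ ((PySem.Dict.mk mi).keys.any
            (fun mf => mfpShares nids db j mf)) = true then
          count.modify (PySem.List.pyGetD nids i 0) PySem.Dict.empty fun inner =>
            inner.modify ((((PySem.Dict.mk mi).keys.filter
                (fun mf => mfpShares nids db j mf)).length : Int)) []
              fun b => b ++ [PySem.List.pyGetD nids j 0]
        else count) count := by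
    apply PySem.List.foldl_congr_mem
    intro acc j _
    by_cases hij : i = j
    · rw [if_pos hij, if_neg (fun h => h.1 hij)]
    · rw [if_neg hij]
      cases hjd : (PySem.Dict.mk db).get? (PySem.List.pyGetD nids j 0) with
      | none =>
        have hany : ((PySem.Dict.mk mi).keys.any (fun mf => mfpShares nids db j mf)) = false := by
          rw [List.any_eq_false]
          intro mf _
          rw [mfpShares_eq]
          simp [mfpKeys, mfpKeyList, hjd]
        rw [if_neg (fun h => by have h2 := h.2; rw [hany] at h2; exact absurd h2 (by decide))]
      | some mj =>
        have hkj : mfpKeys db (PySem.List.pyGetD nids j 0) = (PySem.Dict.mk mj).keys := by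
          simp [mfpKeys, mfpKeyList, hjd]
        have hint : PySem.Set.inter (PySem.Set.ofList (PySem.Dict.mk mi).keys)
              (PySem.Set.ofList (PySem.Dict.mk mj).keys)
            = (PySem.Dict.mk mi).keys.filter (fun mf => mfpShares nids db j mf) := by
          rw [mfp_inter_eq _ _ hnd]
          apply List.filter_congr
          intro mf _
          rw [mfpShares_eq, hkj]
        dsimp only
        rw [hint]
        by_cases hlen : ((PySem.Dict.mk mi).keys.filter
            (fun mf => mfpShares nids db j mf)).length ≠ 0
        · have hne : ((PySem.Dict.mk mi).keys.filter (fun mf => mfpShares nids db j mf)) ≠ [] := by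
            intro h; exact hlen (by rw [h]; rfl)
          obtain ⟨mf, hmf⟩ := List.exists_mem_of_ne_nil _ hne
          have hany : ((PySem.Dict.mk mi).keys.any (fun mf => mfpShares nids db j mf)) = true := by
            rcases List.mem_filter.mp hmf with ⟨hm1, hm2⟩
            exact List.any_eq_true.mpr ⟨mf, hm1, hm2⟩
          rw [if_pos hlen, if_pos ⟨hij, hany⟩]
        · have hlen0 : ((PySem.Dict.mk mi).keys.filter
              (fun mf => mfpShares nids db j mf)).length = 0 := by
            by_contra hc; exact hlen hc
          have hany : ((PySem.Dict.mk mi).keys.any (fun mf => mfpShares nids db j mf)) = false := by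
            rw [List.any_eq_false]
            intro mf hmfk hsh
            have hm : mf ∈ (PySem.Dict.mk mi).keys.filter (fun mf => mfpShares nids db j mf) :=
              List.mem_filter.mpr ⟨hmfk, hsh⟩
            rw [List.length_eq_zero_iff.mp hlen0] at hm
            exact absurd hm (List.not_mem_nil)
          rw [if_neg hlen,
            if_neg (fun h => by have h2 := h.2; rw [hany] at h2; exact absurd h2 (by decide))]
  rw [hA1]
  rw [PySem.List.foldl_ite_eq_foldl_filter
    (p := fun j => (¬ i = j) ∧ ((PySem.Dict.mk mi).keys.any (fun mf => mfpShares nids db j mf)) = true)]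
  rw [mfpSorted nids db pre (PySem.Dict.mk mi).keys]
  have hB1 : ((PySem.List.pyRange 0 (nids.length : Int) 1).filter
        (fun j => (PySem.Dict.mk mi).keys.any (fun mf => mfpShares nids db j mf))).foldl
      (fun count j =>
        if j = i then count
        else
          count.modify (PySem.List.pyGetD nids i 0) PySem.Dict.empty fun inner =>
            inner.modify ((mfpCnt nids db (PySem.Dict.mk mi).keys).getD j 0) []
              fun b => b ++ [PySem.List.pyGetD nids j 0]) count
    = ((PySem.List.pyRange 0 (nids.length : Int) 1).filter
        (fun j => (PySem.Dict.mk mi).keys.any (fun mf => mfpShares nids db j mf))).foldl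
      (fun count j =>
        if ¬ (j = i) then
          count.modify (PySem.List.pyGetD nids i 0) PySem.Dict.empty fun inner =>
            inner.modify ((mfpCnt nids db (PySem.Dict.mk mi).keys).getD j 0) []
              fun b => b ++ [PySem.List.pyGetD nids j 0]
        else count) count := by
    apply PySem.List.foldl_congr_mem
    intro acc j _
    by_cases hij : j = i
    · rw [if_pos hij, if_neg (fun h => h hij)]
    · rw [if_neg hij, if_pos hij]
  rw [hB1]
  rw [PySem.List.foldl_ite_eq_foldl_filter (p := fun j => ¬ (j = i))]
  rw [List.filter_filter]
  have hfeq : ((PySem.List.pyRange 0 (nids.length : Int) 1).filter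
        (fun j => decide ((¬ i = j) ∧ ((PySem.Dict.mk mi).keys.any (fun mf => mfpShares nids db j mf)) = true)))
      = ((PySem.List.pyRange 0 (nids.length : Int) 1).filter
        (fun j => decide (¬ j = i) && (PySem.Dict.mk mi).keys.any (fun mf => mfpShares nids db j mf))) := by
    apply List.filter_congr
    intro j _
    by_cases h2 : j = i
    · subst h2
      simp
    · have h2' : ¬ i = j := fun hh => h2 hh.symm
      by_cases h1 : ((PySem.Dict.mk mi).keys.any (fun mf => mfpShares nids db j mf)) = true
      · rw [h1]
        simp [h2, h2']
      · have h1' : ((PySem.Dict.mk mi).keys.any (fun mf => mfpShares nids db j mf)) = false := by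
          rw [← Bool.not_eq_true]; exact h1
        rw [h1']
        simp [h2, h2']
  rw [hfeq]
  apply PySem.List.foldl_congr_mem
  intro acc j hj
  rcases List.mem_filter.mp hj with ⟨hjr, _⟩
  rw [mfpCnt_getD_eq nids db pre _ j hjr]

theorem mfp_outer (nids : List Int) (db : List (Int × List (Int × Int)))
    (pre : ∀ p ∈ db, (p.2.map Prod.fst).Nodup) :
    compute_mf_share nids db = compute_mf_share_alt nids db := by
  simp only [compute_mf_share, compute_mf_share_alt]
  congr 1
  congr 1
  apply PySem.List.foldl_congr_mem
  intro count i hi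
  have hmemr := PySem.List.mem_pyRange_one.mp hi
  have hmem : PySem.List.pyGetD nids i 0 ∈ nids := mfp_mem_of_idx nids hmemr.1 hmemr.2
  have hgot : (List.foldl (fun ks g =>
        if ks.contains g then ks
        else
          match (PySem.Dict.mk db).get? g with
          | none => ks
          | some m => ks.insert g (PySem.Dict.mk m).keys) PySem.Dict.empty nids).get?
      (PySem.List.pyGetD nids i 0) = mfpKeyList db (PySem.List.pyGetD nids i 0) :=
    mfpKsets_get nids db _ hmem
  rw [hgot]
  cases hdbi : (PySem.Dict.mk db).get? (PySem.List.pyGetD nids i 0) with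
  | none => simp only [mfpKeyList, hdbi, Option.map_none]
  | some mi =>
    simp only [mfpKeyList, hdbi, Option.map_some]
    exact mfp_per_i nids db pre i mi hdbi count

-- ===== VERDICT (by name: the statement is the Claim_ definition above) =====
theorem compute_mf_share_spec : Claim_equal_compute_mf_share := by
  intro nids mf_grc_db _ pre
  show compute_mf_share nids mf_grc_db = compute_mf_share_alt nids mf_grc_db
  exact mfp_outer nids mf_grc_db pre
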